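-- pv_equiv track=rewrite | github.com/shhuiw/bcache-status | bcache-status.py | bcache_topology
-- ===== SOURCE A (Python) =====
-- def bcache_topology(cache_sets, backing_devs):
--     '''
--     construct map of cache_set <-> backing devs
--     @cache_sets     : list of tuples ('CSET-UUID', 'cache device')
--     @backing_devs   : list of tuples like ('bcacheN', 'sdX', 'CSET-UUID' or 'uncached')
--
--     return dict of lists like
--         'CSET-UUID' : ['cache dev name', 'backing dev name : bcacheN', ...]
--         'uncached' : ['backing dev name : bcacheN', ...]
--     '''
--
--     topology = {}
--
--     for cset_uuid, cache_dev in cache_sets: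
--         topology[cset_uuid] = [cache_dev]
--         for item in backing_devs:
--             if item[2] == cset_uuid:
--                 topology[cset_uuid].append('%s : %s' % (item[1], item[0]))
--
--     topology['uncached'] = []
--     for item in backing_devs:
--         if item[2] == 'uncached':
--             topology['uncached'].append('%s : %s' % (item[1], item[0]))
--     if len(topology['uncached']) == 0:
--         del topology['uncached']
--
--     return topology
-- ===== SOURCE B (Python) =====
-- def bcache_topology(cache_sets, backing_devs):
--     # Group backing devices by cset uuid in one pass, then a single lookup
--     # per cache set (O(C+B) instead of A's O(C*B) rescans).
--     groups = {}
--     for bcache, dev, cset in backing_devs: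
--         groups.setdefault(cset, []).append('%s : %s' % (dev, bcache))
--     topology = {uuid: [cache_dev] + groups.get(uuid, [])
--                 for uuid, cache_dev in cache_sets}
--     uncached = groups.get('uncached', [])
--     if uncached:
--         topology['uncached'] = uncached
--     else:
--         topology.pop('uncached', None)
--     return topology
-- ===== Notes on version B (the rewrite author's own statement) =====
-- stated objective: faster
-- what changed: B builds a dict grouping backing devices by cset uuid in one pass and then does one O(1) lookup per cache set, instead of A's full rescan of backing_devs for every cache set; the uncached bucket also comes from that dict instead of a third scan.
import Mathlib
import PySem

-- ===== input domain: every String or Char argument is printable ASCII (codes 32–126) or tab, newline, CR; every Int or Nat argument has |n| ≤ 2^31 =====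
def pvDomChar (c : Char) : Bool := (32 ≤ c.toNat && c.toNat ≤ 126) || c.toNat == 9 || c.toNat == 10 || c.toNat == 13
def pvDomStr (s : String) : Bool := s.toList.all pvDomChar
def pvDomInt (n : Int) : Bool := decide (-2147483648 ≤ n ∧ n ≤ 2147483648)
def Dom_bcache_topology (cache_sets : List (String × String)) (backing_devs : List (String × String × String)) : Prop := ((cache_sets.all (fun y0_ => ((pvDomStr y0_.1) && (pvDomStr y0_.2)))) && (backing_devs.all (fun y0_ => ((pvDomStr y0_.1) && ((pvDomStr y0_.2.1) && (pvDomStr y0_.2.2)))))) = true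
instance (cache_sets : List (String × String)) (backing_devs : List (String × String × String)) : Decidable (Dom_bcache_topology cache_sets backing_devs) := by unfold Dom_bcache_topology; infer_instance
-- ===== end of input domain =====

-- B groups backing devices by cset uuid in one pass and then does one lookup per
-- cache set (O(C+B)) instead of A's rescan of backing_devs for every cache set (O(C*B)).

-- ===== PORT A =====
-- literal transliteration of A: per cache set, insert [cache_dev] and rescan all
-- backing_devs, appending matches; then the 'uncached' bucket, deleted if empty.
-- topology[k].append(x) is ported as modify k [] (· ++ [x]) (k always present here).
def bcache_topology (cache_sets : List (String × String)) (backing_devs : List (String × String × String)) : List (String × List String) :=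
  let topology : PySem.Dict String (List String) :=
    cache_sets.foldl (fun t p =>
      backing_devs.foldl (fun t item =>
        if item.2.2 == p.1 then t.modify p.1 [] (· ++ [item.2.1 ++ " : " ++ item.1]) else t)
        (t.insert p.1 [p.2])) PySem.Dict.empty
  let t2 := topology.insert "uncached" []
  let t2 := backing_devs.foldl (fun t item =>
      if item.2.2 == "uncached" then t.modify "uncached" [] (· ++ [item.2.1 ++ " : " ++ item.1]) else t) t2
  let t2 := if (t2.getD "uncached" []).length == 0 then t2.erase "uncached" else t2
  t2.items

-- ===== PORT B =====
def fmtB (item : String × String × String) : String := item.2.1 ++ " : " ++ item.1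

-- literal transliteration of Source B: groups.setdefault(cset, []).append(s) is
-- modify cset [] (· ++ [s]); topology.pop('uncached', None) is erase (no-op if absent).
def bcache_topology_alt (cache_sets : List (String × String)) (backing_devs : List (String × String × String)) : List (String × List String) :=
  let groups : PySem.Dict String (List String) :=
    backing_devs.foldl (fun g item => g.modify item.2.2 [] (· ++ [fmtB item])) PySem.Dict.empty
  let topology : PySem.Dict String (List String) :=
    cache_sets.foldl (fun t p => t.insert p.1 (p.2 :: groups.getD p.1 [])) PySem.Dict.empty
  let uncached := groups.getD "uncached" []
  (if uncached ≠ [] then topology.insert "uncached" uncached else topology.erase "uncached").items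

-- ===== PRECONDITION & SPEC =====
def Spec_bcache_topology (cache_sets : List (String × String)) (backing_devs : List (String × String × String)) (out : List (String × List String)) : Prop := out = bcache_topology_alt cache_sets backing_devs
instance (cache_sets : List (String × String)) (backing_devs : List (String × String × String)) (out : List (String × List String)) : Decidable (Spec_bcache_topology cache_sets backing_devs out) := by unfold Spec_bcache_topology; infer_instance

-- ===== CLAIM (what is proved, stated in full; the proofs are below) =====
def Claim_equal_bcache_topology : Prop := ∀ (cache_sets : List (String × String)) (backing_devs : List (String × String × String)), Dom_bcache_topology cache_sets backing_devs → Spec_bcache_topology cache_sets backing_devs (bcache_topology cache_sets backing_devs)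

-- ===== LEMMAS AND PROOFS =====

-- modify at a key just inserted = insert with the function applied to the inserted value
theorem modify_insert_self {κ ν : Type} [BEq κ] [LawfulBEq κ] (d : PySem.Dict κ ν) (k : κ) (v : ν) (d0 : ν) (f : ν → ν) :
    (d.insert k v).modify k d0 f = d.insert k (f v) := by
  unfold PySem.Dict.modify
  rw [PySem.Dict.getD_insert_self, PySem.Dict.insert_insert_self]

-- erasing a just-inserted key = erasing from the original dict
theorem erase_insert_self {κ ν : Type} [BEq κ] [LawfulBEq κ] (d : PySem.Dict κ ν) (k : κ) (v : ν) :
    (d.insert k v).erase k = d.erase k := by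
  unfold PySem.Dict.erase PySem.Dict.insert
  split
  · apply PySem.Dict.ext
    simp only
    induction d.items with
    | nil => rfl
    | cons p rest ih =>
      by_cases h : p.1 == k
      · simp [List.filter, h, ih]
      · simp [List.filter, h, ih]
  · apply PySem.Dict.ext
    simp [List.filter_append]

-- A's inner rescan loop, started from a dict where k was just set to v,
-- sets k to v ++ the formatted matches.
theorem innerA_eq (bds : List (String × String × String)) :
    ∀ (t : PySem.Dict String (List String)) (k : String) (v : List String),
    bds.foldl (fun t item =>
        if item.2.2 == k then t.modify k [] (· ++ [item.2.1 ++ " : " ++ item.1]) else t)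
      (t.insert k v)
    = t.insert k (v ++ (bds.filter (fun it => it.2.2 == k)).map fmtB) := by
  induction bds with
  | nil => intro t k v; simp
  | cons item rest ih =>
    intro t k v
    cases hbe : (item.2.2 == k) with
    | true =>
      simp only [List.foldl_cons, hbe, if_true, List.filter_cons]
      rw [modify_insert_self, ih]
      simp [fmtB]
    | false =>
      simp only [List.foldl_cons, hbe, Bool.false_eq_true, if_false, List.filter_cons]
      rw [ih]

-- B's grouping dict looked up at k = the formatted matches.
theorem groups_getD (bds : List (String × String × String)) (k : String) :
    (bds.foldl (fun g item => g.modify item.2.2 [] (· ++ [fmtB item])) PySem.Dict.empty).getD k []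
    = (bds.filter (fun it => it.2.2 == k)).map fmtB := by
  have h : bds.foldl (fun g item => g.modify item.2.2 [] (· ++ [fmtB item])) PySem.Dict.empty
      = (bds.map (fun it => (it.2.2, fmtB it))).foldl (fun g p => g.modify p.1 [] (· ++ [p.2])) PySem.Dict.empty := by
    rw [List.foldl_map]
  rw [h, PySem.Dict.getD_foldl_modify_append]
  simp [List.filter_map, List.map_map, Function.comp_def]

-- ===== VERDICT (by name: the statement is the Claim_ definition above) =====
theorem bcache_topology_spec : Claim_equal_bcache_topology := by
  intro cs bds _
  unfold Spec_bcache_topology bcache_topology bcache_topology_alt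
  simp only
  -- both outer loops build the same dict
  have houter : cs.foldl (fun t p =>
      bds.foldl (fun t item =>
        if item.2.2 == p.1 then t.modify p.1 [] (· ++ [item.2.1 ++ " : " ++ item.1]) else t)
        (t.insert p.1 [p.2])) PySem.Dict.empty
    = cs.foldl (fun t p => t.insert p.1 (p.2 ::
        (bds.foldl (fun g item => g.modify item.2.2 [] (· ++ [fmtB item])) PySem.Dict.empty).getD p.1 []))
        PySem.Dict.empty := by
    congr 1
    funext t p
    rw [innerA_eq, groups_getD]
    rfl
  rw [houter]
  set T := cs.foldl (fun t p => t.insert p.1 (p.2 ::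
        (bds.foldl (fun g item => g.modify item.2.2 [] (· ++ [fmtB item])) PySem.Dict.empty).getD p.1 []))
        PySem.Dict.empty with hT
  set G := (bds.foldl (fun g item => g.modify item.2.2 [] (· ++ [fmtB item])) PySem.Dict.empty).getD "uncached" [] with hG
  -- A's uncached loop
  have huncached : bds.foldl (fun t item =>
      if item.2.2 == "uncached" then t.modify "uncached" [] (· ++ [item.2.1 ++ " : " ++ item.1]) else t)
      (T.insert "uncached" []) = T.insert "uncached" G := by
    rw [innerA_eq]
    rw [hG, groups_getD]
    rfl
  rw [huncached]
  rw [PySem.Dict.getD_insert_self]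
  by_cases hg : G = []
  · simp only [hg, List.length_nil, beq_self_eq_true, if_true, ne_eq, not_true_eq_false, if_false]
    rw [erase_insert_self]
  · have : (G.length == 0) = false := by
      simp [List.length_eq_zero_iff, hg]
    simp only [this, Bool.false_eq_true, if_false, ne_eq, hg, not_false_eq_true, if_true]
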